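-- pv_equiv track=rewrite | github.com/fonttools/fonttools | Lib/fontTools/varLib/builder.py | _reorderItem
-- ===== SOURCE A (Python) =====
-- def _reorderItem(lst, narrows):
-- 	out = []
-- 	count = len(lst)
-- 	for i in range(count):
-- 		if i not in narrows:
-- 			out.append(lst[i])
-- 	for i in range(count):
-- 		if i in narrows:
-- 			out.append(lst[i])
-- 	return out
-- ===== SOURCE B (Python) =====
-- def _reorderItem(lst, narrows):
--     order = sorted(range(len(lst)), key=lambda i: i in narrows)
--     return [lst[i] for i in order]
-- ===== Notes on version B (the rewrite author's own statement) =====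
-- stated objective: idiomatic
-- what changed: Replaces A's two filtering passes with a stable sort of the index list keyed on membership in narrows (False before True) followed by a single gather of lst[i]; stability of sorted preserves the relative order inside each group, so the output is identical.
import Mathlib
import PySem

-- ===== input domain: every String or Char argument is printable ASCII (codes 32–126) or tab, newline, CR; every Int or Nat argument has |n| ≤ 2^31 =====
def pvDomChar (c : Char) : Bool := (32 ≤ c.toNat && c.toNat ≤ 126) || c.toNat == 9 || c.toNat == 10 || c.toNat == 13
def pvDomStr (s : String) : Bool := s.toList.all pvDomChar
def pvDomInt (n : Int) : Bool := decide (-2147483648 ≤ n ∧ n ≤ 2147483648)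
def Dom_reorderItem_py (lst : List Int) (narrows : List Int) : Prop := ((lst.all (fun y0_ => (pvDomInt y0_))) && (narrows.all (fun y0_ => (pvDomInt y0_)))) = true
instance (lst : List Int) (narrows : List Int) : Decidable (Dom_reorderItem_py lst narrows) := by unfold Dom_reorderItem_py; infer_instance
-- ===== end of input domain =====

-- B replaces A's two filtering passes with a stable sort of the indices by the key 'i in narrows'
-- (False before True) followed by one gather lst[i]; objective: idiomatic. Equivalence proved on Dom.


-- ===== PORT A =====
-- out = []; for i in range(count): if i not in narrows: out.append(lst[i]);
-- for i in range(count): if i in narrows: out.append(lst[i]); return out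
-- (lst[i] is always in range here, so pyGetD with default 0 is exact)
def reorderItem_py (lst : List Int) (narrows : List Int) : List Int :=
  let count : Int := lst.length
  let out : List Int :=
    (PySem.List.pyRange 0 count 1).foldl
      (fun out i => if !(narrows.contains i) then out ++ [PySem.List.pyGetD lst i 0] else out) []
  (PySem.List.pyRange 0 count 1).foldl
    (fun out i => if narrows.contains i then out ++ [PySem.List.pyGetD lst i 0] else out) out

-- ===== PORT B =====
-- order = sorted(range(len(lst)), key=lambda i: i in narrows); return [lst[i] for i in order]
def reorderItem_py_alt (lst : List Int) (narrows : List Int) : List Int :=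
  let order : List Int :=
    PySem.List.sorted (PySem.List.pyRange 0 (lst.length : Int) 1)
      (fun i => narrows.contains i) false
  order.map (fun i => PySem.List.pyGetD lst i 0)

-- ===== PRECONDITION & SPEC =====
def Spec_reorderItem_py (lst : List Int) (narrows : List Int) (out : List Int) : Prop := out = reorderItem_py_alt lst narrows
instance (lst : List Int) (narrows : List Int) (out : List Int) : Decidable (Spec_reorderItem_py lst narrows out) := by unfold Spec_reorderItem_py; infer_instance

-- ===== CLAIM =====
def Claim_equal_reorderItem_py : Prop := ∀ (lst : List Int) (narrows : List Int), Dom_reorderItem_py lst narrows → Spec_reorderItem_py lst narrows (reorderItem_py lst narrows)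

-- ===== LEMMAS AND PROOFS =====

-- Inserting an element that 'before'-precedes nothing in l appends it at the end.
theorem insertBy_all_false {α : Type} (before : α → α → Bool) (x : α) (l : List α)
    (h : ∀ y ∈ l, before x y = false) :
    PySem.List.insertBy before x l = l ++ [x] := by
  induction l with
  | nil => rfl
  | cons y ys ih =>
    have hy : before x y = false := h y (by simp)
    simp only [PySem.List.insertBy, hy]
    simp only [Bool.false_eq_true, if_false, List.cons_append, List.cons.injEq, true_and]
    exact ih (fun z hz => h z (by simp [hz]))

-- Inserting x into w ++ n, where x precedes nothing in w and everything in n, puts x between them.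
theorem insertBy_split {α : Type} (before : α → α → Bool) (x : α) (w n : List α)
    (hw : ∀ y ∈ w, before x y = false) (hn : ∀ y ∈ n, before x y = true) :
    PySem.List.insertBy before x (w ++ n) = w ++ x :: n := by
  induction w with
  | nil =>
    cases n with
    | nil => rfl
    | cons y ys =>
      have hy : before x y = true := hn y (by simp)
      simp [PySem.List.insertBy, hy]
  | cons y ys ih =>
    have hy : before x y = false := hw y (by simp)
    simp only [List.cons_append, PySem.List.insertBy, hy]
    simp only [Bool.false_eq_true, if_false, List.cons.injEq, true_and]
    exact ih (fun z hz => hw z (by simp [hz]))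

-- The stable insertion sort by a Bool key, folded from a split accumulator, keeps the
-- False-keyed elements (in order) before the True-keyed ones (in order).
theorem foldl_insert_bool_key {α : Type} (p : α → Bool) (xs w n : List α)
    (hw : ∀ y ∈ w, p y = false) (hn : ∀ y ∈ n, p y = true) :
    xs.foldl (fun acc x => PySem.List.insertBy (fun a b => decide (p a < p b)) x acc) (w ++ n)
      = (w ++ xs.filter (fun x => !p x)) ++ (n ++ xs.filter p) := by
  induction xs generalizing w n with
  | nil => simp
  | cons x t ih =>
    by_cases hx : p x = true
    · have hstep : PySem.List.insertBy (fun a b => decide (p a < p b)) x (w ++ n)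
          = (w ++ n) ++ [x] := by
        apply insertBy_all_false
        intro y _; simp [hx]
      have := ih w (n ++ [x]) hw (by
        intro y hy
        rcases List.mem_append.mp hy with h | h
        · exact hn y h
        · simp at h; simpa [h] using hx)
      simp only [List.foldl_cons, hstep, List.append_assoc] at this ⊢
      rw [this]
      simp [hx]
    · have hx' : p x = false := by simpa using hx
      have hstep : PySem.List.insertBy (fun a b => decide (p a < p b)) x (w ++ n)
          = (w ++ [x]) ++ n := by
        rw [insertBy_split _ x w n
          (fun y hy => by simp [hx', hw y hy])
          (fun y hy => by simp [hx', hn y hy])]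
        simp
      have := ih (w ++ [x]) n (by
        intro y hy
        rcases List.mem_append.mp hy with h | h
        · exact hw y h
        · simp at h; simpa [h] using hx') hn
      simp only [List.foldl_cons, hstep] at this ⊢
      rw [this]
      simp [hx']

-- sorted(xs, key = bool predicate) is the stable partition: non-p elements first, then p elements.
theorem sorted_bool_key {α : Type} (p : α → Bool) (xs : List α) :
    PySem.List.sorted xs p false = xs.filter (fun x => !p x) ++ xs.filter p := by
  have := foldl_insert_bool_key p xs [] [] (by simp) (by simp)
  simpa [PySem.List.sorted] using this

theorem reorderItem_py_eq (lst : List Int) (narrows : List Int) :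
    reorderItem_py lst narrows = reorderItem_py_alt lst narrows := by
  unfold reorderItem_py reorderItem_py_alt
  rw [PySem.List.foldl_append_if, PySem.List.foldl_append_if, sorted_bool_key]
  simp only [List.map_append]
  congr 2

-- ===== VERDICT =====
theorem reorderItem_py_spec : Claim_equal_reorderItem_py := by
  intro lst narrows _
  unfold Spec_reorderItem_py
  exact reorderItem_py_eq lst narrows
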